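-- pv_equiv track=rewrite | github.com/xen0bit/detonate | src/detonate/mapping/patterns.py | _matches_process_hollowing
-- ===== SOURCE A (Python) =====
-- def _matches_process_hollowing(sequence: list[str]) -> bool:
--     """Check if sequence matches process hollowing pattern."""
--     required = [
--         "CreateProcessA",
--         "NtUnmapViewOfSection",
--         "VirtualAllocEx",
--         "WriteProcessMemory",
--         "SetThreadContext",
--     ]
--
--     # Check if all required APIs are present in order
--     indices = []
--     for api in required:
--         try:
--             idx = sequence.index(api)
--             indices.append(idx)
--         except ValueError:
--             return False
--
--     # Verify order
--     return indices == sorted(indices)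
-- ===== SOURCE B (Python) =====
-- def _matches_process_hollowing(sequence: list[str]) -> bool:
--     """Check if sequence matches process hollowing pattern."""
--     required = [
--         "CreateProcessA",
--         "NtUnmapViewOfSection",
--         "VirtualAllocEx",
--         "WriteProcessMemory",
--         "SetThreadContext",
--     ]
--     # Single forward scan with a pending suffix of still-unmatched APIs:
--     # the first time any pending API shows up it must be the next expected one,
--     # otherwise the first occurrences cannot be in the required order.
--     pending = required
--     for api in sequence:
--         if api in pending:
--             if api == pending[0]:
--                 pending = pending[1:]
--             else:
--                 return False
--     return not pending
-- ===== Notes on version B (the rewrite author's own statement) =====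
-- stated objective: alternative
-- what changed: B replaces A's five separate sequence.index scans plus a sort-comparison by a single forward scan running a state machine over a pending suffix of the required APIs: any pending API seen out of turn fails immediately, and success means the whole suffix was consumed.
import Mathlib
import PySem

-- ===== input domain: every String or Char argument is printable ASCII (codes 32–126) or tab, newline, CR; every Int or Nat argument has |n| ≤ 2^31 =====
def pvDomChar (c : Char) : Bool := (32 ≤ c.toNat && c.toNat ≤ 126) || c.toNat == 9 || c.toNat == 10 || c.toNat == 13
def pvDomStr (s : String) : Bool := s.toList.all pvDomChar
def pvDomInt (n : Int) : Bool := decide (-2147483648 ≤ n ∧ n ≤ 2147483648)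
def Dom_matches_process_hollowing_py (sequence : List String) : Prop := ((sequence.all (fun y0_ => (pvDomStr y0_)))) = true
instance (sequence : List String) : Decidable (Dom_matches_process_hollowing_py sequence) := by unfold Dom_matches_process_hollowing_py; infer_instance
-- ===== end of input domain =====

-- B replaces A's five `.index` scans + sort comparison by one forward scan running a state
-- machine over the pending suffix of required APIs (alternative algorithm, same results).

-- ===== PORT A =====
def phRequired : List String :=
  ["CreateProcessA", "NtUnmapViewOfSection", "VirtualAllocEx", "WriteProcessMemory", "SetThreadContext"]

-- the `for api in required` loop collecting indices; `none` = the early `return False`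
def phCollect (sequence : List String) (acc : List Nat) : List String → Option (List Nat)
  | [] => some acc
  | api :: rest =>
    match PySem.List.index? sequence api with
    | none => none
    | some idx => phCollect sequence (acc ++ [idx]) rest

def matches_process_hollowing_py (sequence : List String) : Bool :=
  match phCollect sequence [] phRequired with
  | none => false
  | some indices => decide (indices = PySem.List.sorted indices (fun x => x) false)

-- ===== PORT B =====
def phRequiredB : List String :=
  ["CreateProcessA", "NtUnmapViewOfSection", "VirtualAllocEx", "WriteProcessMemory", "SetThreadContext"]

-- the single `for api in sequence` loop over the pending suffix of required APIs;
-- `pending[0]` is only read when `api in pending`, so pending is nonempty there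
def phRun : List String → List String → Bool
  | rem, [] => rem.isEmpty
  | [], _ :: rest => phRun [] rest
  | r0 :: rs, api :: rest =>
    if (r0 :: rs).contains api then
      (if api = r0 then phRun rs rest else false)
    else phRun (r0 :: rs) rest

def matches_process_hollowing_py_alt (sequence : List String) : Bool :=
  phRun phRequiredB sequence

-- ===== PRECONDITION & SPEC =====
def Spec_matches_process_hollowing_py (sequence : List String) (out : Bool) : Prop := out = matches_process_hollowing_py_alt sequence
instance (sequence : List String) (out : Bool) : Decidable (Spec_matches_process_hollowing_py sequence out) := by unfold Spec_matches_process_hollowing_py; infer_instance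

-- ===== CLAIM (what is proved, stated in full; the proofs are below) =====
def Claim_equal_matches_process_hollowing_py : Prop := ∀ (sequence : List String), Dom_matches_process_hollowing_py sequence → Spec_matches_process_hollowing_py sequence (matches_process_hollowing_py sequence)

-- ===== LEMMAS AND PROOFS =====

-- characterisation of B's state machine: it accepts from state `rem` iff every api of `rem`
-- occurs in `seq` and their first-occurrence indices are strictly increasing in `rem`'s order
def PhSpec (rem : List String) (seq : List String) : Prop :=
  ∃ ns : List Nat, rem.map (fun r => PySem.List.index? seq r) = ns.map some ∧ List.IsChain (· < ·) ns

theorem phRun_nil_rem (seq : List String) : phRun [] seq = true := by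
  induction seq with
  | nil => rfl
  | cons a t ih => simpa [phRun] using ih

theorem map_optmap_eq_map_some (l : List (Option Nat)) (ns : List Nat) :
    l.map (Option.map (· + 1)) = ns.map some ↔ ∃ ms : List Nat, l = ms.map some ∧ ns = ms.map (· + 1) := by
  induction l generalizing ns with
  | nil => cases ns <;> simp
  | cons a t ih =>
    cases ns with
    | nil => simp
    | cons n nt =>
      constructor
      · intro h
        simp only [List.map_cons, List.cons.injEq] at h
        obtain ⟨ha, ht⟩ := h
        obtain ⟨ms, rfl, rfl⟩ := (ih nt).mp ht
        cases a with
        | none => simp at ha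
        | some m =>
          simp only [Option.map_some, Option.some.injEq] at ha
          exact ⟨m :: ms, by simp, by simp [ha]⟩
      · rintro ⟨ms, h1, h2⟩
        cases ms with
        | nil => simp at h1
        | cons m mt =>
          simp only [List.map_cons, List.cons.injEq] at h1 h2
          obtain ⟨rfl, rfl⟩ := h1
          obtain ⟨rfl, rfl⟩ := h2
          simp

theorem chain_map_succ (ms : List Nat) :
    List.IsChain (· < ·) (ms.map (· + 1)) ↔ List.IsChain (· < ·) ms := by
  rw [List.isChain_map]
  constructor
  · exact fun h => h.imp (by omega)
  · exact fun h => h.imp (by omega)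

theorem shift_spec (l : List (Option Nat)) :
    (∃ ns : List Nat, l.map (Option.map (· + 1)) = ns.map some ∧ List.IsChain (· < ·) ns) ↔
      (∃ ns : List Nat, l = ns.map some ∧ List.IsChain (· < ·) ns) := by
  constructor
  · rintro ⟨ns, h, hc⟩
    obtain ⟨ms, rfl, rfl⟩ := (map_optmap_eq_map_some l ns).mp h
    exact ⟨ms, rfl, (chain_map_succ ms).mp hc⟩
  · rintro ⟨ns, rfl, hc⟩
    exact ⟨ns.map (· + 1), by simp [List.map_map], (chain_map_succ ns).mpr hc⟩

theorem all_some_of_eq_map_some {l : List (Option Nat)} {ns : List Nat}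
    (h : l = ns.map some) : ∀ o ∈ l, o.isSome := by
  subst h
  intro o ho
  obtain ⟨n, -, rfl⟩ := List.mem_map.mp ho
  rfl

-- map over a state whose elements all differ from the scanned api shifts by one
theorem map_index?_cons_of_not_mem (api : String) (rest : List String) (rem : List String)
    (h : ∀ r ∈ rem, r ≠ api) :
    rem.map (fun r => PySem.List.index? (api :: rest) r) =
      (rem.map (fun r => PySem.List.index? rest r)).map (Option.map (· + 1)) := by
  rw [List.map_map]
  refine List.map_congr_left fun r hr => ?_
  exact PySem.List.index?_cons_of_ne rest fun e => (h r hr) e.symm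

theorem phRun_iff (seq : List String) : ∀ rem : List String, rem.Nodup →
    (phRun rem seq = true ↔ PhSpec rem seq) := by
  induction seq with
  | nil =>
    intro rem _
    cases rem with
    | nil =>
      simp only [phRun, List.isEmpty_nil, true_iff]
      exact ⟨[], by simp, List.IsChain.nil⟩
    | cons r rs =>
      simp only [phRun, List.isEmpty_cons, Bool.false_eq_true, false_iff]
      rintro ⟨ns, h, -⟩
      have := all_some_of_eq_map_some h (PySem.List.index? [] r) (by simp)
      rw [PySem.List.index?_eq_idxOf?] at this
      simp at this
  | cons api rest ih =>
    intro rem hnd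
    cases rem with
    | nil =>
      simp only [phRun, phRun_nil_rem, true_iff]
      exact ⟨[], by simp, List.IsChain.nil⟩
    | cons r0 rs =>
      by_cases h0 : api = r0
      · subst h0
        have hr0 : api ∉ rs := (List.nodup_cons.mp hnd).1
        have hrs : rs.Nodup := (List.nodup_cons.mp hnd).2
        have hshift := map_index?_cons_of_not_mem api rest rs
          (fun r hr e => hr0 (e ▸ hr))
        simp only [phRun, List.contains_cons, BEq.rfl, Bool.true_or, if_true, ih rs hrs]
        unfold PhSpec
        rw [List.map_cons, PySem.List.index?_cons_self, hshift]
        constructor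
        · rintro ⟨ms, hm, hc⟩
          refine ⟨0 :: ms.map (· + 1), ?_, ?_⟩
          · rw [hm]
            simp [List.map_map]
          · rw [List.isChain_cons]
            refine ⟨fun b hb => ?_, (chain_map_succ ms).mpr hc⟩
            obtain ⟨m, -, rfl⟩ := List.mem_map.mp (List.mem_of_mem_head? hb)
            omega
        · rintro ⟨ns, h, hc⟩
          cases ns with
          | nil => simp at h
          | cons n nt =>
            simp only [List.map_cons, List.cons.injEq] at h
            obtain ⟨ms, hl, rfl⟩ := (map_optmap_eq_map_some _ nt).mp h.2
            exact ⟨ms, hl, (chain_map_succ ms).mp ((List.isChain_cons.mp hc).2)⟩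
      · by_cases h1 : api ∈ rs
        · have hmemb : (r0 :: rs).contains api = true := by
            simp [h1]
          simp only [phRun, hmemb, if_true, if_neg h0, Bool.false_eq_true, false_iff]
          rintro ⟨ns, h, hc⟩
          cases ns with
          | nil => simp at h
          | cons a nt =>
            simp only [List.map_cons, List.cons.injEq] at h
            have hhead : PySem.List.index? (api :: rest) r0 = some a := h.1
            rw [PySem.List.index?_cons_of_ne rest h0] at hhead
            obtain ⟨k, -, hk⟩ := Option.map_eq_some_iff.mp hhead
            have hmem : (some 0 : Option Nat) ∈
                rs.map (fun r => PySem.List.index? (api :: rest) r) := by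
              refine List.mem_map.mpr ⟨api, h1, ?_⟩
              exact PySem.List.index?_cons_self api rest
            rw [h.2] at hmem
            obtain ⟨z, hz, hz0⟩ := List.mem_map.mp hmem
            have hz' : z = 0 := Option.some.inj hz0
            subst hz'
            have hp := List.isChain_iff_pairwise.mp hc
            have := (List.pairwise_cons.mp hp).1 0 hz
            omega
        · have hnm : (r0 :: rs).contains api = false := by
            simp only [List.contains_cons, Bool.or_eq_false_iff]
            exact ⟨by simpa using h0, by simpa using h1⟩
          have hshift := map_index?_cons_of_not_mem api rest (r0 :: rs)
            (by intro r hr e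
                rw [e] at hr
                rcases List.mem_cons.mp hr with e2 | e2
                · exact h0 e2
                · exact h1 e2)
          simp only [phRun, hnm, Bool.false_eq_true, if_false, ih _ hnd]
          unfold PhSpec
          rw [hshift, shift_spec]

-- first occurrences of distinct strings are distinct
theorem index?_inj {seq : List String} {a b : String} {n : Nat}
    (ha : PySem.List.index? seq a = some n) (hb : PySem.List.index? seq b = some n) : a = b := by
  obtain ⟨hk, hget, -⟩ := PySem.List.getElem_of_index?_eq_some ha
  obtain ⟨hk', hget', -⟩ := PySem.List.getElem_of_index?_eq_some hb
  rw [← hget, ← hget']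

theorem sorted5_iff (a b c d e : Nat) :
    decide (([a,b,c,d,e] : List Nat) = PySem.List.sorted [a,b,c,d,e] (fun x => x) false)
      = (a ≤ b && b ≤ c && c ≤ d && d ≤ e) := by
  have hp : (([a,b,c,d,e] : List Nat).Pairwise (· ≤ ·)) ↔ (a ≤ b ∧ b ≤ c ∧ c ≤ d ∧ d ≤ e) := by
    constructor
    · intro h; simp [List.pairwise_cons] at h; omega
    · intro h; simp [List.pairwise_cons]; omega
  by_cases h : a ≤ b ∧ b ≤ c ∧ c ≤ d ∧ d ≤ e
  · rw [PySem.List.sorted_eq_self_of_pairwise _ _ (hp.mpr h)]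
    simp [h.1, h.2.1, h.2.2.1, h.2.2.2]
  · have hne : ([a,b,c,d,e] : List Nat) ≠ PySem.List.sorted [a,b,c,d,e] (fun x => x) false := by
      intro he
      exact h (hp.mp (he ▸ PySem.List.sorted_pairwise ([a,b,c,d,e] : List Nat) (fun x => x)))
    rw [decide_eq_false hne]
    symm; rw [Bool.eq_false_iff]
    intro hb; apply h; simp at hb; omega

-- ===== VERDICT (by name: the statement is the Claim_ definition above) =====
theorem matches_process_hollowing_py_spec : Claim_equal_matches_process_hollowing_py := by
  intro seq _
  unfold Spec_matches_process_hollowing_py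
  have hB := phRun_iff seq phRequiredB (by decide)
  unfold PhSpec phRequiredB at hB
  simp only [List.map_cons, List.map_nil, PySem.List.index?_eq_idxOf?] at hB
  show matches_process_hollowing_py seq = matches_process_hollowing_py_alt seq
  unfold matches_process_hollowing_py_alt phRequiredB
  cases o1 : List.idxOf? "CreateProcessA" seq with
  | none =>
    have hA : matches_process_hollowing_py seq = false := by
      simp [matches_process_hollowing_py, phCollect, phRequired, o1]
    have hBf : phRun ["CreateProcessA", "NtUnmapViewOfSection", "VirtualAllocEx", "WriteProcessMemory", "SetThreadContext"] seq = false := by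
      rw [Bool.eq_false_iff]
      intro ht
      obtain ⟨ns, h, -⟩ := hB.mp ht
      rw [o1] at h
      rcases ns with _ | ⟨a, t⟩ <;> simp at h
    rw [hA, hBf]
  | some n1 =>
  cases o2 : List.idxOf? "NtUnmapViewOfSection" seq with
  | none =>
    have hA : matches_process_hollowing_py seq = false := by
      simp [matches_process_hollowing_py, phCollect, phRequired, o1, o2]
    have hBf : phRun ["CreateProcessA", "NtUnmapViewOfSection", "VirtualAllocEx", "WriteProcessMemory", "SetThreadContext"] seq = false := by
      rw [Bool.eq_false_iff]
      intro ht
      obtain ⟨ns, h, -⟩ := hB.mp ht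
      rw [o1, o2] at h
      rcases ns with _ | ⟨a, _ | ⟨b, t⟩⟩ <;> simp at h
    rw [hA, hBf]
  | some n2 =>
  cases o3 : List.idxOf? "VirtualAllocEx" seq with
  | none =>
    have hA : matches_process_hollowing_py seq = false := by
      simp [matches_process_hollowing_py, phCollect, phRequired, o1, o2, o3]
    have hBf : phRun ["CreateProcessA", "NtUnmapViewOfSection", "VirtualAllocEx", "WriteProcessMemory", "SetThreadContext"] seq = false := by
      rw [Bool.eq_false_iff]
      intro ht
      obtain ⟨ns, h, -⟩ := hB.mp ht
      rw [o1, o2, o3] at h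
      rcases ns with _ | ⟨a, _ | ⟨b, _ | ⟨c, t⟩⟩⟩ <;> simp at h
    rw [hA, hBf]
  | some n3 =>
  cases o4 : List.idxOf? "WriteProcessMemory" seq with
  | none =>
    have hA : matches_process_hollowing_py seq = false := by
      simp [matches_process_hollowing_py, phCollect, phRequired, o1, o2, o3, o4]
    have hBf : phRun ["CreateProcessA", "NtUnmapViewOfSection", "VirtualAllocEx", "WriteProcessMemory", "SetThreadContext"] seq = false := by
      rw [Bool.eq_false_iff]
      intro ht
      obtain ⟨ns, h, -⟩ := hB.mp ht
      rw [o1, o2, o3, o4] at h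
      rcases ns with _ | ⟨a, _ | ⟨b, _ | ⟨c, _ | ⟨d, t⟩⟩⟩⟩ <;> simp at h
    rw [hA, hBf]
  | some n4 =>
  cases o5 : List.idxOf? "SetThreadContext" seq with
  | none =>
    have hA : matches_process_hollowing_py seq = false := by
      simp [matches_process_hollowing_py, phCollect, phRequired, o1, o2, o3, o4, o5]
    have hBf : phRun ["CreateProcessA", "NtUnmapViewOfSection", "VirtualAllocEx", "WriteProcessMemory", "SetThreadContext"] seq = false := by
      rw [Bool.eq_false_iff]
      intro ht
      obtain ⟨ns, h, -⟩ := hB.mp ht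
      rw [o1, o2, o3, o4, o5] at h
      rcases ns with _ | ⟨a, _ | ⟨b, _ | ⟨c, _ | ⟨d, _ | ⟨e, t⟩⟩⟩⟩⟩ <;> simp at h
    rw [hA, hBf]
  | some n5 =>
    have hA : matches_process_hollowing_py seq = (n1 ≤ n2 && n2 ≤ n3 && n3 ≤ n4 && n4 ≤ n5) := by
      simp only [matches_process_hollowing_py, phCollect, phRequired, PySem.List.index?_eq_idxOf?,
        o1, o2, o3, o4, o5, List.nil_append, List.cons_append]
      rw [sorted5_iff]
    rw [o1, o2, o3, o4, o5] at hB
    have hB' : phRun ["CreateProcessA", "NtUnmapViewOfSection", "VirtualAllocEx", "WriteProcessMemory", "SetThreadContext"] seq = true ↔ (n1 < n2 ∧ n2 < n3 ∧ n3 < n4 ∧ n4 < n5) := by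
      rw [hB]
      constructor
      · rintro ⟨ns, h, hc⟩
        rcases ns with _ | ⟨a, _ | ⟨b, _ | ⟨c, _ | ⟨d, _ | ⟨e, _ | ⟨f, t⟩⟩⟩⟩⟩⟩ <;> simp at h
        obtain ⟨rfl, rfl, rfl, rfl, rfl⟩ := h
        have hp := List.isChain_iff_pairwise.mp hc
        simp [List.pairwise_cons] at hp
        refine ⟨?_, ?_, ?_, ?_⟩ <;> omega
      · rintro ⟨h12, h23, h34, h45⟩
        exact ⟨[n1, n2, n3, n4, n5], by simp, by simp [List.isChain_cons, h12, h23, h34, h45]⟩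
    have o1' : PySem.List.index? seq "CreateProcessA" = some n1 := by
      rw [PySem.List.index?_eq_idxOf?]; exact o1
    have o2' : PySem.List.index? seq "NtUnmapViewOfSection" = some n2 := by
      rw [PySem.List.index?_eq_idxOf?]; exact o2
    have o3' : PySem.List.index? seq "VirtualAllocEx" = some n3 := by
      rw [PySem.List.index?_eq_idxOf?]; exact o3
    have o4' : PySem.List.index? seq "WriteProcessMemory" = some n4 := by
      rw [PySem.List.index?_eq_idxOf?]; exact o4
    have o5' : PySem.List.index? seq "SetThreadContext" = some n5 := by
      rw [PySem.List.index?_eq_idxOf?]; exact o5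
    have e12 : n1 ≠ n2 := fun e => absurd (index?_inj o1' (e ▸ o2')) (by decide)
    have e23 : n2 ≠ n3 := fun e => absurd (index?_inj o2' (e ▸ o3')) (by decide)
    have e34 : n3 ≠ n4 := fun e => absurd (index?_inj o3' (e ▸ o4')) (by decide)
    have e45 : n4 ≠ n5 := fun e => absurd (index?_inj o4' (e ▸ o5')) (by decide)
    rw [hA, Bool.eq_iff_iff, hB']
    simp only [Bool.and_eq_true, decide_eq_true_eq]
    omega
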